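-- pv_equiv track=rewrite | github.com/subaltankwal/IR-Project-2 | exp5.py | bag_of_entities
-- ===== SOURCE A (Python) =====
-- def bag_of_entities(document, entity_list):
--     entity_vector = {}
--     n = len(document)
--     for i in range(n):
--         for j in range(i+1, n+1):
--             substring = document[i:j]
--             if substring in entity_list:
--                 if substring in entity_vector:
--                     entity_vector[substring] += 1
--                 else:
--                     entity_vector[substring] = 1
--     return entity_vector
-- ===== SOURCE B (Python) =====
-- def bag_of_entities(document, entity_list):
--     # Per-entity matching: scan each start position once and test only the
--     # (deduplicated, nonempty) entities, shortest first, instead of enumerating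
--     # every substring of the document.
--     ents = sorted((e for e in dict.fromkeys(entity_list) if e), key=len)
--     counts = {}
--     for i in range(len(document)):
--         for e in ents:
--             if document.startswith(e, i):
--                 counts[e] = counts.get(e, 0) + 1
--     return counts
-- ===== Notes on version B (the rewrite author's own statement) =====
-- stated objective: faster
-- what changed: Instead of enumerating every substring document[i:j] and testing it against the entity list, B scans each start position once and tests only the deduplicated nonempty entities (sorted shortest-first so the dict's first-match insertion order is preserved).
import Mathlib
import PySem

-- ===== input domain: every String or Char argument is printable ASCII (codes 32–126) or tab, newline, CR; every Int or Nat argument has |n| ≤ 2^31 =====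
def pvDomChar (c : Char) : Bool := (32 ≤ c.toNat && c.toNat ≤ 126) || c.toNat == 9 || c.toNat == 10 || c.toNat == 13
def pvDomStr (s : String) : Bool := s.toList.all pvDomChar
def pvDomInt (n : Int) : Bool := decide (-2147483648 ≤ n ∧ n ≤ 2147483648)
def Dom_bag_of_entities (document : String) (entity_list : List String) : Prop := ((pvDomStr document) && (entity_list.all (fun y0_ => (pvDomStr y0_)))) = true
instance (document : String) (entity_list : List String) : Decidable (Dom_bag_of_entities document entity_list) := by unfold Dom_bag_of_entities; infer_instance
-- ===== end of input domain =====

-- B replaces A's enumeration of all substrings of the document by a single scan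
-- of the start positions testing only the deduplicated nonempty entities
-- (shortest first), the same dict in the same insertion order.

-- ===== PORT A =====
def bag_of_entities (document : String) (entity_list : List String) : List (String × Int) :=
  let s := document.toList
  let n := s.length
  let ev : PySem.Dict String Int :=
    (List.range n).foldl (fun d i =>
      (List.range' (i+1) (n-i)).foldl (fun d (j : Nat) =>
        let substring := String.ofList (PySem.List.slice s (some (i : Int)) (some (j : Int)))
        if substring ∈ entity_list then
          if d.contains substring then d.modify substring 0 (· + 1)
          else d.insert substring 1
        else d) d) PySem.Dict.empty
  ev.items

-- ===== PORT B =====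
def bag_of_entities_alt (document : String) (entity_list : List String) : List (String × Int) :=
  -- ents = sorted((e for e in dict.fromkeys(entity_list) if e), key=len)
  let ents := PySem.List.sorted ((PySem.List.dedup entity_list).filter (fun e => e != "")) (fun e => PySem.Str.len e) false
  let s := document.toList
  let counts : PySem.Dict String Int :=
    (List.range s.length).foldl (fun d i =>
      ents.foldl (fun d e =>
        -- document.startswith(e, i) with 0 ≤ i: exact as a prefix test on the chars from position i
        if e.toList.isPrefixOf (s.drop i) then d.insert e (d.getD e 0 + 1) else d) d)
      PySem.Dict.empty
  counts.items

-- ===== PRECONDITION & SPEC =====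
def Spec_bag_of_entities (document : String) (entity_list : List String) (out : List (String × Int)) : Prop := out = bag_of_entities_alt document entity_list
instance (document : String) (entity_list : List String) (out : List (String × Int)) : Decidable (Spec_bag_of_entities document entity_list out) := by unfold Spec_bag_of_entities; infer_instance

-- ===== CLAIM (what is proved, stated in full; the proofs are below) =====
def Claim_equal_bag_of_entities : Prop := ∀ (document : String) (entity_list : List String), Dom_bag_of_entities document entity_list → Spec_bag_of_entities document entity_list (bag_of_entities document entity_list)

-- ===== LEMMAS AND PROOFS =====

-- the common counting step d[k] = d.get(k, 0) + 1
def pvBump (d : PySem.Dict String Int) (k : String) : PySem.Dict String Int := d.insert k (d.getD k 0 + 1)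

-- B's candidate list
def pvEnts (el : List String) : List String :=
  PySem.List.sorted ((PySem.List.dedup el).filter (fun e => e != "")) (fun e => PySem.Str.len e) false

-- document[i:j] as A computes it
def pvSub (s : List Char) (i j : Nat) : String := String.ofList ((s.drop i).take (j - i))

-- the keys A's inner loop bumps at start position i, in order
def pvSeqA (s : List Char) (el : List String) (i : Nat) : List String :=
  (List.range' (i+1) (s.length - i)).filterMap
    (fun j => if pvSub s i j ∈ el then some (pvSub s i j) else none)

-- the keys B's inner loop bumps at start position i, in order
def pvSeqB (s : List Char) (el : List String) (i : Nat) : List String :=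
  (pvEnts el).filterMap (fun e => if e.toList.isPrefixOf (s.drop i) then some e else none)

theorem pv_foldl_ite_bump {α : Type} (p : α → Prop) [DecidablePred p] (g : α → String)
    (l : List α) (d : PySem.Dict String Int) :
    l.foldl (fun d x => if p x then pvBump d (g x) else d) d
      = (l.filterMap (fun x => if p x then some (g x) else none)).foldl pvBump d := by
  induction l generalizing d with
  | nil => rfl
  | cons a t ih => by_cases h : p a <;> simp [h, ih]

theorem pv_eq_of_pairwise_lt {α : Type} (key : α → Nat) :
    ∀ (l₁ l₂ : List α), l₁.Pairwise (fun a b => key a < key b) →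
      l₂.Pairwise (fun a b => key a < key b) → (∀ x, x ∈ l₁ ↔ x ∈ l₂) → l₁ = l₂ := by
  intro l₁
  induction l₁ with
  | nil =>
    intro l₂ _ _ hmem
    cases l₂ with
    | nil => rfl
    | cons b t₂ => exact absurd ((hmem b).mpr (List.mem_cons_self)) (List.not_mem_nil)
  | cons a t ih =>
    intro l₂ h₁ h₂ hmem
    cases l₂ with
    | nil => exact absurd ((hmem a).mp (List.mem_cons_self)) (List.not_mem_nil)
    | cons b t₂ =>
      have hab : a = b := by
        by_contra hne
        have ha2 : a ∈ t₂ := by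
          have h := (hmem a).mp List.mem_cons_self
          rcases List.mem_cons.mp h with h' | h'
          · exact absurd h' hne
          · exact h'
        have hb1 : b ∈ t := by
          have h := (hmem b).mpr List.mem_cons_self
          rcases List.mem_cons.mp h with h' | h'
          · exact absurd h'.symm hne
          · exact h'
        have hx1 := (List.pairwise_cons.mp h₁).1 b hb1
        have hx2 := (List.pairwise_cons.mp h₂).1 a ha2
        omega
      subst hab
      have htl : t = t₂ := by
        apply ih t₂ (List.pairwise_cons.mp h₁).2 (List.pairwise_cons.mp h₂).2
        intro x
        constructor
        · intro hx
          have hxa : key a < key x := (List.pairwise_cons.mp h₁).1 x hx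
          have h := (hmem x).mp (List.mem_cons_of_mem _ hx)
          rcases List.mem_cons.mp h with h' | h'
          · subst h'; exact absurd hxa (lt_irrefl _)
          · exact h'
        · intro hx
          have hxa : key a < key x := (List.pairwise_cons.mp h₂).1 x hx
          have h := (hmem x).mpr (List.mem_cons_of_mem _ hx)
          rcases List.mem_cons.mp h with h' | h'
          · subst h'; exact absurd hxa (lt_irrefl _)
          · exact h'
      rw [htl]

theorem pv_mem_seqA (s : List Char) (el : List String) (i : Nat) (x : String) :
    x ∈ pvSeqA s el i ↔ x ∈ el ∧ x.toList ≠ [] ∧ x.toList <+: s.drop i := by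
  unfold pvSeqA
  simp only [List.mem_filterMap, List.mem_range'_1, Option.ite_none_right_eq_some, Option.some.injEq]
  constructor
  · rintro ⟨j, ⟨hj1, hj2⟩, hmem, hx⟩
    subst hx
    have hlen : (pvSub s i j).toList.length = j - i := by
      simp [pvSub, List.length_take, List.length_drop]
      omega
    refine ⟨hmem, ?_, ?_⟩
    · intro h
      rw [h] at hlen
      simp at hlen
      omega
    · simpa [pvSub] using List.take_prefix (j - i) (s.drop i)
  · rintro ⟨hel, hne, hpre⟩
    have hL : 0 < x.toList.length := List.length_pos_of_ne_nil hne
    have hLe : x.toList.length ≤ s.length - i := by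
      have := hpre.length_le
      simpa using this
    have htake := List.prefix_iff_eq_take.mp hpre
    have hx : pvSub s i (i + x.toList.length) = x := by
      unfold pvSub
      have harith : i + x.toList.length - i = x.toList.length := by omega
      rw [harith, ← htake, String.ofList_toList]
    refine ⟨i + x.toList.length, ⟨by omega, by omega⟩, ?_, hx⟩
    rw [hx]
    exact hel

theorem pv_mem_seqB (s : List Char) (el : List String) (i : Nat) (x : String) :
    x ∈ pvSeqB s el i ↔ x ∈ el ∧ x.toList ≠ [] ∧ x.toList <+: s.drop i := by
  unfold pvSeqB pvEnts
  simp only [List.mem_filterMap, Option.ite_none_right_eq_some, Option.some.injEq,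
    PySem.List.mem_sorted, List.mem_filter, PySem.List.mem_dedup]
  constructor
  · rintro ⟨e, ⟨hmem, hne⟩, hpre, rfl⟩
    refine ⟨hmem, ?_, List.isPrefixOf_iff_prefix.mp hpre⟩
    intro h
    have hx0 : e = "" := by
      have := congrArg String.ofList h
      simpa using this
    simp [hx0] at hne
  · rintro ⟨hel, hne, hpre⟩
    refine ⟨x, ⟨hel, ?_⟩, List.isPrefixOf_iff_prefix.mpr hpre, rfl⟩
    simp only [bne_iff_ne, ne_eq]
    intro h
    subst h
    simp at hne

theorem pv_pairwise_seqA (s : List Char) (el : List String) (i : Nat) (hi : i < s.length) :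
    (pvSeqA s el i).Pairwise (fun a b => a.toList.length < b.toList.length) := by
  unfold pvSeqA
  rw [List.pairwise_filterMap]
  have hpw : (List.range' (i+1) (s.length - i)).Pairwise
      (fun a b => i + 1 ≤ a ∧ a < b ∧ b ≤ s.length) := by
    apply List.Pairwise.imp_of_mem ?_ (List.pairwise_lt_range' (s := i+1) (n := s.length - i) 1)
    intro a b ha hb hlt
    have h1 := List.mem_range'_1.mp ha
    have h2 := List.mem_range'_1.mp hb
    exact ⟨h1.1, hlt, by omega⟩
  apply hpw.imp
  intro j1 j2 hj b hb b' hb'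
  obtain ⟨hb1, hb2, hb3⟩ := hj
  rw [Option.ite_none_right_eq_some, Option.some.injEq] at hb hb'
  obtain ⟨-, rfl⟩ := hb
  obtain ⟨-, rfl⟩ := hb'
  have l1 : (pvSub s i j1).toList.length = min (j1 - i) (s.length - i) := by
    simp [pvSub, List.length_take, List.length_drop]
  have l2 : (pvSub s i j2).toList.length = min (j2 - i) (s.length - i) := by
    simp [pvSub, List.length_take, List.length_drop]
  omega

theorem pv_pairwise_seqB (s : List Char) (el : List String) (i : Nat) :
    (pvSeqB s el i).Pairwise (fun a b => a.toList.length < b.toList.length) := by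
  unfold pvSeqB
  rw [List.pairwise_filterMap]
  have h1 : (pvEnts el).Pairwise (fun a b => PySem.Str.len a ≤ PySem.Str.len b) :=
    PySem.List.sorted_pairwise _ _
  have h2 : (pvEnts el).Nodup := by
    unfold pvEnts
    exact ((PySem.List.sorted_perm _ _ _).nodup_iff).mpr ((PySem.List.nodup_dedup el).filter _)
  apply (h1.and h2).imp
  intro a b hab x hx x' hx'
  obtain ⟨hle, hne⟩ := hab
  rw [Option.ite_none_right_eq_some, Option.some.injEq] at hx hx'
  obtain ⟨hpa, rfl⟩ := hx
  obtain ⟨hpb, rfl⟩ := hx'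
  have hlen : a.toList.length ≤ b.toList.length := by
    have := hle
    rw [PySem.Str.len_eq, PySem.Str.len_eq] at this
    exact_mod_cast this
  rcases lt_or_eq_of_le hlen with h | h
  · exact h
  · exfalso
    apply hne
    have ha := List.prefix_iff_eq_take.mp (List.isPrefixOf_iff_prefix.mp hpa)
    have hb := List.prefix_iff_eq_take.mp (List.isPrefixOf_iff_prefix.mp hpb)
    have : a.toList = b.toList := by rw [ha, hb, h]
    have := congrArg String.ofList this
    simpa using this

theorem pv_seq_eq (s : List Char) (el : List String) (i : Nat) (hi : i < s.length) :
    pvSeqA s el i = pvSeqB s el i :=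
  pv_eq_of_pairwise_lt (fun x => x.toList.length) _ _
    (pv_pairwise_seqA s el i hi) (pv_pairwise_seqB s el i)
    (fun x => (pv_mem_seqA s el i x).trans (pv_mem_seqB s el i x).symm)

theorem pv_innerA (s : List Char) (el : List String) (i : Nat) (d : PySem.Dict String Int) :
    (List.range' (i+1) (s.length - i)).foldl (fun d (j : Nat) =>
        if String.ofList (PySem.List.slice s (some (i : Int)) (some (j : Int))) ∈ el then
          if d.contains (String.ofList (PySem.List.slice s (some (i : Int)) (some (j : Int)))) then
            d.modify (String.ofList (PySem.List.slice s (some (i : Int)) (some (j : Int)))) 0 (· + 1)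
          else d.insert (String.ofList (PySem.List.slice s (some (i : Int)) (some (j : Int)))) 1
        else d) d
      = (pvSeqA s el i).foldl pvBump d := by
  have hstep : ∀ (d : PySem.Dict String Int) (j : Nat),
      (if String.ofList (PySem.List.slice s (some (i : Int)) (some (j : Int))) ∈ el then
         if d.contains (String.ofList (PySem.List.slice s (some (i : Int)) (some (j : Int)))) then
           d.modify (String.ofList (PySem.List.slice s (some (i : Int)) (some (j : Int)))) 0 (· + 1)
         else d.insert (String.ofList (PySem.List.slice s (some (i : Int)) (some (j : Int)))) 1
       else d)
      = if pvSub s i j ∈ el then pvBump d (pvSub s i j) else d := by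
    intro d j
    have hsl : String.ofList (PySem.List.slice s (some (i : Int)) (some (j : Int))) = pvSub s i j := by
      rw [pvSub, PySem.List.slice_natCast]
    rw [hsl]
    by_cases h : pvSub s i j ∈ el
    · simp only [h, if_true]
      by_cases hc : (d.contains (pvSub s i j)) = true
      · simp only [hc, if_true]
        rfl
      · have hc' : d.contains (pvSub s i j) = false := by simpa using hc
        rw [hc']
        simp [pvBump, PySem.Dict.getD_of_not_contains d 0 hc']
    · simp [h]
  rw [PySem.List.foldl_congr_mem _ _
        (fun d j => if pvSub s i j ∈ el then pvBump d (pvSub s i j) else d) d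
        (fun acc x _ => hstep acc x)]
  exact pv_foldl_ite_bump (fun j => pvSub s i j ∈ el) (fun j => pvSub s i j) _ d

theorem pv_innerB (s : List Char) (el : List String) (i : Nat) (d : PySem.Dict String Int) :
    (pvEnts el).foldl (fun d e =>
        if e.toList.isPrefixOf (s.drop i) then d.insert e (d.getD e 0 + 1) else d) d
      = (pvSeqB s el i).foldl pvBump d :=
  pv_foldl_ite_bump (fun e => e.toList.isPrefixOf (s.drop i) = true) (fun e => e) _ d

-- ===== VERDICT (by name: the statement is the Claim_ definition above) =====
theorem bag_of_entities_spec : Claim_equal_bag_of_entities := by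
  intro document entity_list _
  show bag_of_entities document entity_list = bag_of_entities_alt document entity_list
  unfold bag_of_entities bag_of_entities_alt
  simp only []
  apply congrArg PySem.Dict.items
  apply PySem.List.foldl_congr_mem
  intro d i hi
  have hi' : i < document.toList.length := List.mem_range.mp hi
  rw [pv_innerA document.toList entity_list i d]
  rw [show PySem.List.sorted ((PySem.List.dedup entity_list).filter (fun e => e != ""))
        (fun e => PySem.Str.len e) false = pvEnts entity_list from rfl]
  rw [pv_innerB document.toList entity_list i d, pv_seq_eq _ _ _ hi']
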